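-- pv_equiv track=rewrite | github.com/Jimdewit/AoC | advent 2020/challenge 01/number01.py | read_and_group
-- ===== SOURCE A (Python) =====
-- def read_and_group(input):
--     sizes = {}
--     y = 1
--     while y < 5:
--         sizes[str(y)] = []
--         for x in input:
--             if len(str(x)) == y:
--                 sizes[str(y)].append(x)
--         y += 1
--     return sizes
-- ===== SOURCE B (Python) =====
-- def read_and_group(input):
--     sizes = {str(k): [] for k in range(1, 5)}
--     for x in input:
--         L = len(str(x))
--         if 1 <= L <= 4:
--             sizes[str(L)].append(x)
--     return sizes
-- ===== Notes on version B (the rewrite author's own statement) =====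
-- stated objective: faster
-- what changed: Replaces A's four full scans of the input (one per digit-length bucket, driven by a while loop) with a pre-initialized dict and a single pass that computes each element's string length once and appends it to the matching bucket.
import Mathlib
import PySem

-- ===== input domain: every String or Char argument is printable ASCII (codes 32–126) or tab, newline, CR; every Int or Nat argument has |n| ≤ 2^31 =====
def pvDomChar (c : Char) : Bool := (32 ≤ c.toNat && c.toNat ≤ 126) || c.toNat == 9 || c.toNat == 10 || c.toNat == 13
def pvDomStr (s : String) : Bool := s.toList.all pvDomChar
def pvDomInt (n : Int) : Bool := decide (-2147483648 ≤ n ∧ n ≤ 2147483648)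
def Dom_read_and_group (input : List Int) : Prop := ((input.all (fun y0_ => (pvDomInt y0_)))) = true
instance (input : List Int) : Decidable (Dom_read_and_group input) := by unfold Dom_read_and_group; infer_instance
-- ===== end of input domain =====

-- B replaces A's four separate scans of the input (one per digit-length bucket) with a
-- pre-initialized dict and a single pass (str(x) computed once per element); objective: faster by a constant factor. A mutates no argument.


-- ===== PORT A =====
-- the while loop 'while y < 5: …; y += 1', recursing on y
def pvReadLoopA (input : List Int) (sizes : PySem.Dict String (List Int)) (y : Int) :
    PySem.Dict String (List Int) :=
  if y < 5 then
    pvReadLoopA input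
      (input.foldl
        (fun d x =>
          if (((PySem.Int.toStr x).length : Int) == y) then
            d.modify (PySem.Int.toStr y) [] (fun l => l ++ [x])
          else d)
        (sizes.insert (PySem.Int.toStr y) []))
      (y + 1)
  else sizes
termination_by (5 - y).toNat
decreasing_by omega

def read_and_group (input : List Int) : List (String × List Int) :=
  (pvReadLoopA input PySem.Dict.empty 1).items

-- ===== PORT B =====
def read_and_group_alt (input : List Int) : List (String × List Int) :=
  let sizes := (PySem.List.pyRange 1 5 1).foldl
    (fun d k => d.insert (PySem.Int.toStr k) ([] : List Int)) PySem.Dict.empty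
  (input.foldl
    (fun d x =>
      let L : Int := ((PySem.Int.toStr x).length : Int)
      if 1 ≤ L ∧ L ≤ 4 then d.modify (PySem.Int.toStr L) [] (fun l => l ++ [x]) else d)
    sizes).items

-- ===== PRECONDITION & SPEC =====
def Spec_read_and_group (input : List Int) (out : List (String × List Int)) : Prop := out = read_and_group_alt input
instance (input : List Int) (out : List (String × List Int)) : Decidable (Spec_read_and_group input out) := by unfold Spec_read_and_group; infer_instance

-- ===== CLAIM (what is proved, stated in full; the proofs are below) =====
def Claim_equal_read_and_group : Prop := ∀ (input : List Int), Dom_read_and_group input → Spec_read_and_group input (read_and_group input)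

-- ===== LEMMAS AND PROOFS =====

-- the elements of `input` whose decimal string has length y, in order
def pvF (y : Int) (input : List Int) : List Int :=
  input.filter (fun x => (((PySem.Int.toStr x).length : Int) == y))

lemma pvMapIdOfNe (pre : List (String × List Int)) (k : String) (z : String × List Int)
    (hpre : ∀ p ∈ pre, p.1 ≠ k) :
    pre.map (fun p => if p.1 = k then z else p) = pre := by
  induction pre with
  | nil => rfl
  | cons q t ih =>
      simp [hpre q (by simp), ih (fun p hp => hpre p (by simp [hp]))]

-- modifying a key that occurs exactly once, in the middle of the items list
lemma pvModifyMid (pre suf : List (String × List Int)) (k : String)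
    (hpre : ∀ p ∈ pre, p.1 ≠ k) (hsuf : ∀ p ∈ suf, p.1 ≠ k)
    (a : List Int) (f : List Int → List Int) :
    (PySem.Dict.mk (pre ++ (k, a) :: suf)).modify k [] f
      = PySem.Dict.mk (pre ++ (k, f a) :: suf) := by
  have hc : (PySem.Dict.mk (pre ++ (k, a) :: suf)).contains k = true := by
    simp [PySem.Dict.contains]
  have hfind : List.find? (fun p => p.1 == k) pre = none :=
    List.find?_eq_none.mpr (fun p hp => by simp [hpre p hp])
  have hg : (PySem.Dict.mk (pre ++ (k, a) :: suf)).get? k = some a := by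
    simp [PySem.Dict.get?, hfind]
  simp [PySem.Dict.modify, PySem.Dict.insert, hc, PySem.Dict.getD, hg,
    pvMapIdOfNe pre k _ hpre, pvMapIdOfNe suf k _ hsuf]

lemma pvInsertFresh (l : List (String × List Int)) (k : String)
    (h : ∀ p ∈ l, p.1 ≠ k) (v : List Int) :
    (PySem.Dict.mk l).insert k v = PySem.Dict.mk (l ++ [(k, v)]) := by
  have hc : (PySem.Dict.mk l).contains k = false := by
    simp [PySem.Dict.contains]
    exact fun x b hb => by simpa using h (x, b) hb
  simp [PySem.Dict.insert, hc]

-- one pass of A's inner for-loop, on a dict whose last key k is str(y)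
lemma pvAFold (y : Int) (k : String) (hk : PySem.Int.toStr y = k)
    (pre : List (String × List Int)) (hpre : ∀ p ∈ pre, p.1 ≠ k) :
    ∀ (input : List Int) (a : List Int),
    input.foldl
      (fun d x =>
        if (((PySem.Int.toStr x).length : Int) == y) then
          d.modify k [] (fun l => l ++ [x])
        else d)
      (PySem.Dict.mk (pre ++ [(k, a)]))
    = PySem.Dict.mk (pre ++ [(k, a ++ pvF y input)]) := by
  subst hk
  intro input
  induction input with
  | nil => intro a; simp [pvF]
  | cons x t ih =>
      intro a
      by_cases hx : (((PySem.Int.toStr x).length : Int) == y)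
      · have hmod := pvModifyMid pre [] (PySem.Int.toStr y) hpre (by simp) a
          (fun l => l ++ [x])
        simp only [List.foldl_cons, hx, if_pos, hmod]
        rw [show (pre ++ (PySem.Int.toStr y, a ++ [x]) :: [])
              = pre ++ [(PySem.Int.toStr y, a ++ [x])] by simp]
        rw [ih (a ++ [x])]
        simp [pvF, hx]
      · simp only [List.foldl_cons, hx, if_neg, Bool.false_eq_true, not_false_iff]
        rw [ih a]
        simp only [pvF, List.filter_cons] at *
        simp [hx]

theorem pvAEval (input : List Int) :
    read_and_group input
      = [("1", pvF 1 input), ("2", pvF 2 input), ("3", pvF 3 input), ("4", pvF 4 input)] := by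
  have h1 : PySem.Int.toStr 1 = "1" := by decide
  have h2 : PySem.Int.toStr 2 = "2" := by decide
  have h3 : PySem.Int.toStr 3 = "3" := by decide
  have h4 : PySem.Int.toStr 4 = "4" := by decide
  unfold read_and_group
  rw [pvReadLoopA, if_pos (by norm_num : (1:Int) < 5), h1]
  rw [show (PySem.Dict.empty : PySem.Dict String (List Int)).insert "1" []
        = PySem.Dict.mk ([] ++ [("1", [])]) from rfl]
  rw [pvAFold 1 "1" h1 [] (by simp)]
  rw [show (1:Int) + 1 = 2 from by norm_num]
  rw [pvReadLoopA, if_pos (by norm_num : (2:Int) < 5), h2]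
  rw [pvInsertFresh _ "2" (by simp) []]
  rw [pvAFold 2 "2" h2 _ (by simp)]
  rw [show (2:Int) + 1 = 3 from by norm_num]
  rw [pvReadLoopA, if_pos (by norm_num : (3:Int) < 5), h3]
  rw [pvInsertFresh _ "3" (by simp) []]
  rw [pvAFold 3 "3" h3 _ (by simp)]
  rw [show (3:Int) + 1 = 4 from by norm_num]
  rw [pvReadLoopA, if_pos (by norm_num : (4:Int) < 5), h4]
  rw [pvInsertFresh _ "4" (by simp) []]
  rw [pvAFold 4 "4" h4 _ (by simp)]
  rw [show (4:Int) + 1 = 5 from by norm_num]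
  rw [pvReadLoopA, if_neg (by norm_num : ¬ (5:Int) < 5)]
  simp

-- one step of B's single pass, on the four-bucket dict
lemma pvBFold :
    ∀ (input : List Int) (a1 a2 a3 a4 : List Int),
    input.foldl
      (fun d x =>
        let L : Int := ((PySem.Int.toStr x).length : Int)
        if 1 ≤ L ∧ L ≤ 4 then d.modify (PySem.Int.toStr L) [] (fun l => l ++ [x]) else d)
      (PySem.Dict.mk [("1", a1), ("2", a2), ("3", a3), ("4", a4)])
    = PySem.Dict.mk [("1", a1 ++ pvF 1 input), ("2", a2 ++ pvF 2 input),
        ("3", a3 ++ pvF 3 input), ("4", a4 ++ pvF 4 input)] := by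
  intro input
  induction input with
  | nil => intro a1 a2 a3 a4; simp [pvF]
  | cons x t ih =>
      intro a1 a2 a3 a4
      simp only [List.foldl_cons]
      by_cases e1 : (PySem.Int.toStr x).length = 1
      · rw [if_pos (by rw [e1]; norm_num), e1]
        rw [show PySem.Int.toStr ((1 : Nat) : Int) = "1" from rfl]
        rw [show (PySem.Dict.mk [("1", a1), ("2", a2), ("3", a3), ("4", a4)]).modify "1" []
              (fun l => l ++ [x])
            = PySem.Dict.mk ([] ++ ("1", a1 ++ [x]) :: [("2", a2), ("3", a3), ("4", a4)])
          from pvModifyMid [] _ "1" (by simp) (by simp) a1 _]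
        rw [show ([] ++ ("1", a1 ++ [x]) :: [("2", a2), ("3", a3), ("4", a4)])
              = [("1", a1 ++ [x]), ("2", a2), ("3", a3), ("4", a4)] from rfl]
        rw [ih]
        simp [pvF, e1]
      · by_cases e2 : (PySem.Int.toStr x).length = 2
        · rw [if_pos (by rw [e2]; norm_num), e2]
          rw [show PySem.Int.toStr ((2 : Nat) : Int) = "2" from rfl]
          rw [show (PySem.Dict.mk [("1", a1), ("2", a2), ("3", a3), ("4", a4)]).modify "2" []
                (fun l => l ++ [x])
              = PySem.Dict.mk ([("1", a1)] ++ ("2", a2 ++ [x]) :: [("3", a3), ("4", a4)])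
            from pvModifyMid [("1", a1)] _ "2" (by simp) (by simp) a2 _]
          rw [show ([("1", a1)] ++ ("2", a2 ++ [x]) :: [("3", a3), ("4", a4)])
                = [("1", a1), ("2", a2 ++ [x]), ("3", a3), ("4", a4)] from rfl]
          rw [ih]
          simp [pvF, e2]
        · by_cases e3 : (PySem.Int.toStr x).length = 3
          · rw [if_pos (by rw [e3]; norm_num), e3]
            rw [show PySem.Int.toStr ((3 : Nat) : Int) = "3" from rfl]
            rw [show (PySem.Dict.mk [("1", a1), ("2", a2), ("3", a3), ("4", a4)]).modify "3" []
                  (fun l => l ++ [x])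
                = PySem.Dict.mk ([("1", a1), ("2", a2)] ++ ("3", a3 ++ [x]) :: [("4", a4)])
              from pvModifyMid [("1", a1), ("2", a2)] _ "3" (by simp) (by simp) a3 _]
            rw [show ([("1", a1), ("2", a2)] ++ ("3", a3 ++ [x]) :: [("4", a4)])
                  = [("1", a1), ("2", a2), ("3", a3 ++ [x]), ("4", a4)] from rfl]
            rw [ih]
            simp [pvF, e3]
          · by_cases e4 : (PySem.Int.toStr x).length = 4
            · rw [if_pos (by rw [e4]; norm_num), e4]
              rw [show PySem.Int.toStr ((4 : Nat) : Int) = "4" from rfl]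
              rw [show (PySem.Dict.mk [("1", a1), ("2", a2), ("3", a3), ("4", a4)]).modify "4" []
                    (fun l => l ++ [x])
                  = PySem.Dict.mk ([("1", a1), ("2", a2), ("3", a3)] ++ ("4", a4 ++ [x]) :: [])
                from pvModifyMid [("1", a1), ("2", a2), ("3", a3)] _ "4" (by simp) (by simp) a4 _]
              rw [show ([("1", a1), ("2", a2), ("3", a3)] ++ ("4", a4 ++ [x]) :: [])
                    = [("1", a1), ("2", a2), ("3", a3), ("4", a4 ++ [x])] from rfl]
              rw [ih]
              simp [pvF, e4]
            · rw [if_neg (by omega)]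
              rw [ih]
              simp only [pvF, List.filter_cons]
              have c1 : ((((PySem.Int.toStr x).length : Nat) : Int) == (1 : Int)) = false := by
                simp; omega
              have c2 : ((((PySem.Int.toStr x).length : Nat) : Int) == (2 : Int)) = false := by
                simp; omega
              have c3 : ((((PySem.Int.toStr x).length : Nat) : Int) == (3 : Int)) = false := by
                simp; omega
              have c4 : ((((PySem.Int.toStr x).length : Nat) : Int) == (4 : Int)) = false := by
                simp; omega
              rw [c1, c2, c3, c4]
              simp

theorem pvBEval (input : List Int) :
    read_and_group_alt input
      = [("1", pvF 1 input), ("2", pvF 2 input), ("3", pvF 3 input), ("4", pvF 4 input)] := by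
  show (input.foldl
      (fun d x =>
        let L : Int := ((PySem.Int.toStr x).length : Int)
        if 1 ≤ L ∧ L ≤ 4 then d.modify (PySem.Int.toStr L) [] (fun l => l ++ [x]) else d)
      (PySem.Dict.mk [("1", []), ("2", []), ("3", []), ("4", [])])).items
    = [("1", pvF 1 input), ("2", pvF 2 input), ("3", pvF 3 input), ("4", pvF 4 input)]
  rw [pvBFold]
  simp

-- ===== VERDICT (by name: the statement is the Claim_ definition above) =====
theorem read_and_group_spec : Claim_equal_read_and_group := by
  intro input _
  unfold Spec_read_and_group
  rw [pvAEval, pvBEval]
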